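-- pv_equiv track=rewrite | github.com/Ratheronfire/advent-of-code | year_2023/day-12.py | is_row_valid
-- ===== SOURCE A (Python) =====
-- def is_row_valid(gear_row: list[str], runs: list[int], allow_partial_solution: bool) -> bool:
--     current_run = 0
--
--     gears = list(gear_row).copy()
--     gears.append('.')  # padding to make testing at the edge easier
--
--     runs_to_test = list(runs).copy()
--
--     for i, gear in enumerate(gears):
--         if gear == '#':
--             current_run += 1
--
--             if current_run > runs_to_test[0]:
--                 return False
--         elif gear == '.' and current_run > 0:
--             if not allow_partial_solution and current_run < runs_to_test[0]:
--                 return False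
--
--             current_run = 0
--             runs_to_test = runs_to_test[1:]
--
--             if len(runs_to_test) == 0:
--                 return '#' not in gears[i+1:]
--
--     return False
-- ===== SOURCE B (Python) =====
-- def is_row_valid(gear_row: list[str], runs: list[int], allow_partial_solution: bool) -> bool:
--     # Two-phase: first collect the lengths of the maximal '#'-runs (a run is
--     # closed only by a '.'; other elements are ignored; a trailing '.' closes
--     # the last run), then match that list of lengths against `runs`.
--     groups = []
--     count = 0
--     for gear in list(gear_row) + ['.']:
--         if gear == '#':
--             count += 1
--         elif gear == '.':
--             if count > 0:
--                 groups.append(count)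
--             count = 0
--     idx = 0
--     for j, c in enumerate(groups):
--         expected = runs[idx]  # IndexError iff runs is empty, exactly as in A
--         if c > expected:
--             return False
--         if not allow_partial_solution and c < expected:
--             return False
--         idx += 1
--         if idx == len(runs):
--             return j == len(groups) - 1
--     return False
-- ===== Notes on version B (the rewrite author's own statement) =====
-- stated objective: alternative
-- what changed: B separates the scan into two phases: one pass collects the lengths of all '.'-closed '#'-runs into a list, then a second loop matches that list of lengths against runs, replacing A's single stateful loop with interleaved early returns and its '#'-membership scan of the remaining suffix.
import Mathlib
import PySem

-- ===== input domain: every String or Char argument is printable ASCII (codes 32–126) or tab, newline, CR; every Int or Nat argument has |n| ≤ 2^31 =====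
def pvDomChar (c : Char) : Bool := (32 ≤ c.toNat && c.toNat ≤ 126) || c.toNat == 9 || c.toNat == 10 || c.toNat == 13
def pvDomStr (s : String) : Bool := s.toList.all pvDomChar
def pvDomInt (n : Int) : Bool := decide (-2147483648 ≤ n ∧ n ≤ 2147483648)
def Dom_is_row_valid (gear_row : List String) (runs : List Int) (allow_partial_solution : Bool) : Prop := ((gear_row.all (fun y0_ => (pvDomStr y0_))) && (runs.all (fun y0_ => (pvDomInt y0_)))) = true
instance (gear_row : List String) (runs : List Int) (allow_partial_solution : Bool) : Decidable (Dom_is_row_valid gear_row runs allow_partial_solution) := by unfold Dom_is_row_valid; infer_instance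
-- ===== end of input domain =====

-- B replaces A's single stateful scan by two phases: collect the lengths of the '.'-closed
-- '#'-runs, then match that length list against `runs` (alternative decomposition, same cost).


-- ===== PORT A =====
-- A's loop over `gears` (= gear_row with a '.' appended), with state current_run / runs_to_test.
-- The recursion walks the list element by element, so the unprocessed tail `rest` is exactly
-- Python's gears[i+1:] (i+1 ≥ 0, so the slice is the plain suffix).
def pvAgo (allow : Bool) : List String → Int → List Int → Bool
  | [], _, _ => false                     -- loop ended: return False
  | g :: rest, cr, rtt =>
    if g = "#" then
      match rtt with
      | [] => false                       -- Python raises IndexError here; excluded by Pre_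
      | r :: _ =>
        if cr + 1 > r then false
        else pvAgo allow rest (cr + 1) rtt
    else if g = "." ∧ cr > 0 then
      match rtt with
      | [] => if !allow then false        -- Python raises IndexError iff not allow; this state
              else !(rest.contains "#")   -- is unreachable from the entry point (cr starts at 0)
      | r :: rs =>
        if !allow && cr < r then false
        else if rs.isEmpty then !(rest.contains "#")   -- '#' not in gears[i+1:]
        else pvAgo allow rest 0 rs
    else pvAgo allow rest cr rtt

def is_row_valid (gear_row : List String) (runs : List Int) (allow_partial_solution : Bool) : Bool :=
  pvAgo allow_partial_solution (gear_row ++ ["."]) 0 runs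

-- ===== PORT B =====
-- Phase 1 of Source B: lengths of the maximal '#'-runs, a run closed (and recorded if > 0) by '.'.
def pvGroups : List String → Int → List Int
  | [], _ => []
  | g :: rest, cnt =>
    if g = "#" then pvGroups rest (cnt + 1)
    else if g = "." then
      if cnt > 0 then cnt :: pvGroups rest 0 else pvGroups rest 0
    else pvGroups rest cnt

-- Phase 2 of Source B: walk groups and runs together (rr is runs[idx:]).
def pvCheck (allow : Bool) : List Int → List Int → Bool
  | [], _ => false
  | c :: gs, rr =>
    match rr with
    | [] => false                         -- Python raises IndexError (runs empty); excluded by Pre_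
    | r :: rs =>
      if c > r then false
      else if !allow && c < r then false
      else if rs.isEmpty then gs.isEmpty  -- idx == len(runs): return j == len(groups) - 1
      else pvCheck allow gs rs

def is_row_valid_alt (gear_row : List String) (runs : List Int) (allow_partial_solution : Bool) : Bool :=
  pvCheck allow_partial_solution (pvGroups (gear_row ++ ["."]) 0) runs

-- ===== PRECONDITION & SPEC =====
-- Pre_ excludes exactly the inputs where A raises IndexError: runs empty while gear_row contains '#'.
def Pre_is_row_valid (gear_row : List String) (runs : List Int) (allow_partial_solution : Bool) : Prop :=
  ¬ (runs = [] ∧ "#" ∈ gear_row)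
instance (gear_row : List String) (runs : List Int) (allow_partial_solution : Bool) : Decidable (Pre_is_row_valid gear_row runs allow_partial_solution) := by unfold Pre_is_row_valid; infer_instance

def pvWitness_is_row_valid : List String × List Int × Bool := (["#", "#", "?", ".", "#"], [2, 1], true)

def Spec_is_row_valid (gear_row : List String) (runs : List Int) (allow_partial_solution : Bool) (out : Bool) : Prop := out = is_row_valid_alt gear_row runs allow_partial_solution
instance (gear_row : List String) (runs : List Int) (allow_partial_solution : Bool) (out : Bool) : Decidable (Spec_is_row_valid gear_row runs allow_partial_solution out) := by unfold Spec_is_row_valid; infer_instance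

-- ===== CLAIM (what is proved, stated in full; the proofs are below) =====
def Claim_equal_is_row_valid : Prop := ∀ (gear_row : List String) (runs : List Int) (allow_partial_solution : Bool), Dom_is_row_valid gear_row runs allow_partial_solution → Pre_is_row_valid gear_row runs allow_partial_solution → Spec_is_row_valid gear_row runs allow_partial_solution (is_row_valid gear_row runs allow_partial_solution)

-- ===== LEMMAS AND PROOFS =====

-- Equation lemmas for the three ports' recursions (one per branch shape).
theorem pvAgo_hash (allow : Bool) (rest : List String) (cr r : Int) (rs : List Int) :
    pvAgo allow ("#" :: rest) cr (r :: rs)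
      = if cr + 1 > r then false else pvAgo allow rest (cr + 1) (r :: rs) := by
  simp [pvAgo]

theorem pvAgo_dot_pos (allow : Bool) (rest : List String) (cr r : Int) (rs : List Int)
    (hc : cr > 0) :
    pvAgo allow ("." :: rest) cr (r :: rs)
      = if !allow && cr < r then false
        else if rs.isEmpty then !(rest.contains "#") else pvAgo allow rest 0 rs := by
  simp [pvAgo, hc]

theorem pvAgo_dot_zero (allow : Bool) (rest : List String) (rtt : List Int) :
    pvAgo allow ("." :: rest) 0 rtt = pvAgo allow rest 0 rtt := by
  simp [pvAgo]

theorem pvAgo_other (allow : Bool) (g : String) (rest : List String) (cr : Int) (rtt : List Int)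
    (hg : g ≠ "#") (hd : g ≠ ".") :
    pvAgo allow (g :: rest) cr rtt = pvAgo allow rest cr rtt := by
  simp [pvAgo, hg, hd]

theorem pvGroups_hash (rest : List String) (cnt : Int) :
    pvGroups ("#" :: rest) cnt = pvGroups rest (cnt + 1) := by
  simp [pvGroups]

theorem pvGroups_dot (rest : List String) (cnt : Int) :
    pvGroups ("." :: rest) cnt
      = if cnt > 0 then cnt :: pvGroups rest 0 else pvGroups rest 0 := by
  simp [pvGroups]

theorem pvGroups_other (g : String) (rest : List String) (cnt : Int)
    (hg : g ≠ "#") (hd : g ≠ ".") :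
    pvGroups (g :: rest) cnt = pvGroups rest cnt := by
  simp [pvGroups, hg, hd]

theorem pvCheck_cons (allow : Bool) (c : Int) (gs : List Int) (r : Int) (rs : List Int) :
    pvCheck allow (c :: gs) (r :: rs)
      = if c > r then false
        else if !allow && c < r then false
        else if rs.isEmpty then gs.isEmpty else pvCheck allow gs rs := by
  simp [pvCheck]

-- With no runs left to match, phase 2 of B always answers false.
theorem pvCheck_nil (allow : Bool) (gs : List Int) : pvCheck allow gs [] = false := by
  cases gs <;> simp [pvCheck]

-- A with no '#' in sight never records a run and falls off the loop with False.
theorem pvAgo_no_hash (allow : Bool) (gears : List String) (rtt : List Int)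
    (h : "#" ∉ gears) : pvAgo allow gears 0 rtt = false := by
  induction gears with
  | nil => simp [pvAgo]
  | cons g rest ih =>
    simp only [List.mem_cons, not_or] at h
    simp [pvAgo, Ne.symm h.1, ih h.2]

-- If the first pending run r is already smaller than the open '#'-count (or than 1 when no
-- count is open), B rejects: the next recorded group is at least max cr 1.
theorem pvCheck_groups_over (allow : Bool) (gears : List String) (cr r : Int) (rs : List Int)
    (hcr : 0 ≤ cr) (hr : r < max cr 1) :
    pvCheck allow (pvGroups gears cr) (r :: rs) = false := by
  induction gears generalizing cr with
  | nil => simp [pvGroups, pvCheck]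
  | cons g rest ih =>
    by_cases hg : g = "#"
    · subst hg; rw [pvGroups_hash]
      exact ih (cr + 1) (by omega) (by omega)
    · by_cases hd : g = "."
      · subst hd; rw [pvGroups_dot]
        by_cases hc : cr > 0
        · have h1 : cr > r := by omega
          simp [hc, pvCheck_cons, h1]
        · rw [if_neg hc]
          exact ih 0 le_rfl (by omega)
      · rw [pvGroups_other g rest cr hg hd]
        exact ih cr hcr hr

-- The trailing-dot shape: every suffix A recurses on is [] or ends with ".".
def pvTD (gears : List String) : Prop := gears = [] ∨ ∃ l, gears = l ++ ["."]

theorem pvTD_cons_ne {g : String} {rest : List String} (h : pvTD (g :: rest)) (hg : g ≠ ".") :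
    ∃ l, rest = l ++ ["."] := by
  rcases h with h | ⟨l, hl⟩
  · exact absurd h (by simp)
  · cases l with
    | nil => simp at hl; exact absurd hl.1 hg
    | cons a l' =>
      simp only [List.cons_append, List.cons.injEq] at hl
      exact ⟨l', hl.2⟩

theorem pvTD_tail_dot {rest : List String} (h : pvTD ("." :: rest)) : pvTD rest := by
  rcases h with h | ⟨l, hl⟩
  · exact absurd h (by simp)
  · cases l with
    | nil => simp at hl; exact Or.inl hl
    | cons a l' =>
      simp only [List.cons_append, List.cons.injEq] at hl
      exact Or.inr ⟨l', hl.2⟩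

-- On a suffix ending in '.', an open '#'-count is always eventually recorded.
theorem pvGroups_ne_nil (gears : List String) (cr : Int) (hcr : 0 < cr)
    (h : ∃ l, gears = l ++ ["."]) : pvGroups gears cr ≠ [] := by
  induction gears generalizing cr with
  | nil => rcases h with ⟨l, hl⟩; simp at hl
  | cons g rest ih =>
    by_cases hg : g = "#"
    · subst hg; rw [pvGroups_hash]
      exact ih (cr + 1) (by omega) (pvTD_cons_ne (Or.inr h) (by simp))
    · by_cases hd : g = "."
      · subst hd; rw [pvGroups_dot, if_pos hcr]; simp
      · rw [pvGroups_other g rest cr hg hd]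
        exact ih cr hcr (pvTD_cons_ne (Or.inr h) hd)

-- On a trailing-dot suffix, "no recorded groups" = "no '#' at all".
theorem pvGroups_isEmpty (gears : List String) (h : pvTD gears) :
    (pvGroups gears 0).isEmpty = !(gears.contains "#") := by
  induction gears with
  | nil => simp [pvGroups]
  | cons g rest ih =>
    by_cases hg : g = "#"
    · subst hg
      have hne := pvGroups_ne_nil rest 1 (by omega) (pvTD_cons_ne h (by simp))
      rw [pvGroups_hash]
      simp [hne]
    · by_cases hd : g = "."
      · subst hd
        rw [pvGroups_dot, if_neg (by omega : ¬ (0:Int) > 0), ih (pvTD_tail_dot h)]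
        simp
      · rw [pvGroups_other g rest 0 hg hd, ih (Or.inr (pvTD_cons_ne h hd))]
        simp [Ne.symm hg]

-- Main invariant: mid-scan, A with open count cr and pending runs r::rs agrees with B run on
-- the groups of the remaining suffix with the open count folded in.
theorem pvMain (gears : List String) (cr r : Int) (rs : List Int) (allow : Bool)
    (hcr : 0 ≤ cr) (hle : cr = 0 ∨ cr ≤ r) (htd : pvTD gears) :
    pvAgo allow gears cr (r :: rs) = pvCheck allow (pvGroups gears cr) (r :: rs) := by
  induction gears generalizing cr r rs with
  | nil => simp [pvAgo, pvGroups, pvCheck]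
  | cons g rest ih =>
    by_cases hg : g = "#"
    · subst hg
      have htd' : ∃ l, rest = l ++ ["."] := pvTD_cons_ne htd (by simp)
      rw [pvAgo_hash, pvGroups_hash]
      by_cases hover : cr + 1 > r
      · rw [if_pos hover, pvCheck_groups_over allow rest (cr + 1) r rs (by omega) (by omega)]
      · rw [if_neg hover]
        exact ih (cr + 1) r rs (by omega) (Or.inr (by omega)) (Or.inr htd')
    · by_cases hd : g = "."
      · subst hd
        have htd' : pvTD rest := pvTD_tail_dot htd
        by_cases hc : cr > 0
        · have hcle : cr ≤ r := by rcases hle with h | h <;> omega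
          rw [pvAgo_dot_pos allow rest cr r rs hc, pvGroups_dot, if_pos hc, pvCheck_cons,
            if_neg (by omega : ¬ cr > r)]
          by_cases hp : (!allow && decide (cr < r)) = true
          · rw [if_pos hp, if_pos hp]
          · rw [if_neg hp, if_neg hp]
            cases rs with
            | nil =>
              simp only [List.isEmpty_nil, if_true]
              exact (pvGroups_isEmpty rest htd').symm
            | cons r' rs' =>
              rw [if_neg (by simp), if_neg (by simp)]
              exact ih 0 r' rs' le_rfl (Or.inl rfl) htd'
        · have hc0 : cr = 0 := by omega
          subst hc0
          rw [pvAgo_dot_zero, pvGroups_dot, if_neg hc]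
          exact ih 0 r rs le_rfl (Or.inl rfl) htd'
      · have htd' : pvTD rest := Or.inr (pvTD_cons_ne htd hd)
        rw [pvAgo_other allow g rest cr (r :: rs) hg hd, pvGroups_other g rest cr hg hd]
        exact ih cr r rs hcr hle htd'

-- ===== VERDICT (by name: the statement is the Claim_ definition above) =====
theorem is_row_valid_spec : Claim_equal_is_row_valid := by
  intro gear_row runs allow _ hpre
  unfold Spec_is_row_valid is_row_valid is_row_valid_alt
  cases runs with
  | nil =>
    have hnh : "#" ∉ gear_row := fun h => hpre ⟨rfl, h⟩
    rw [pvCheck_nil, pvAgo_no_hash]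
    simp only [List.mem_append, List.mem_singleton, not_or]
    exact ⟨hnh, by simp⟩
  | cons r rs =>
    exact pvMain (gear_row ++ ["."]) 0 r rs allow le_rfl (Or.inl rfl) (Or.inr ⟨gear_row, rfl⟩)
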